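-- pv_equiv track=rewrite | github.com/milberg77/hinglish-pii-detection | src/models/train_anonymizer.py | build_label_list
-- ===== SOURCE A (Python) =====
-- from typing import List, Dict
--
-- def build_label_list(label_seqs: List[List[str]]) -> List[str]:
--     seen = set()
--     for seq in label_seqs:
--         for l in seq:
--             seen.add(l)
--     # ensure paired B-/I- for each entity
--     additions = set()
--     for l in list(seen):
--         if l.startswith("B-"):
--             ent = l.split("-", 1)[1]
--             if f"I-{ent}" not in seen:
--                 additions.add(f"I-{ent}")
--         if l.startswith("I-"):
--             ent = l.split("-", 1)[1]
--             if f"B-{ent}" not in seen: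
--                 additions.add(f"B-{ent}")
--     seen.update(additions)
--     labels = ["O"] + sorted([x for x in seen if x != "O"])
--     return labels
-- ===== SOURCE B (Python) =====
-- def build_label_list(label_seqs):
--     entities = set()
--     others = set()
--     for seq in label_seqs:
--         for l in seq:
--             if l == "O":
--                 continue
--             if l.startswith("B-") or l.startswith("I-"):
--                 entities.add(l.split("-", 1)[1])
--             else:
--                 others.add(l)
--     result = others | {p + e for e in entities for p in ("B-", "I-")}
--     return ["O"] + sorted(result)
-- ===== Notes on version B (the rewrite author's own statement) =====
-- stated objective: simpler
-- what changed: Instead of collecting all labels and then scanning the set to add each missing B-/I- partner with a membership test, B classifies each token's label once into an entity name or an 'other' label and regenerates both B-/I- tags per entity, so the pairing pass and its lookups disappear.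
import Mathlib
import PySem

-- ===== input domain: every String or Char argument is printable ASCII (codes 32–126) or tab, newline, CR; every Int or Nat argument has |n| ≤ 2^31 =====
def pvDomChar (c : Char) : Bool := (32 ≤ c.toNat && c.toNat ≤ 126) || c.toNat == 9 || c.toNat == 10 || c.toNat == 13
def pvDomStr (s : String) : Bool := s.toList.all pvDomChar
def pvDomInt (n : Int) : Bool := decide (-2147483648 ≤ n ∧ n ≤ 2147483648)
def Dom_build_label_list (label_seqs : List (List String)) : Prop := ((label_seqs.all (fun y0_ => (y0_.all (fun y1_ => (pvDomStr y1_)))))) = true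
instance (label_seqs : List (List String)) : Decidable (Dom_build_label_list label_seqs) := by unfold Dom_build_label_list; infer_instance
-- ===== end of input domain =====

-- B replaces A's collect-all-then-scan-and-pair pass by a single classification of each
-- label into an entity name or an 'other' label, regenerating both B-/I- tags per entity (objective: simpler).


-- shared helper: Python's  l.split("-", 1)[1]  (both ports reach it only under a "B-"/"I-" prefix guard,
-- where the index 1 exists, so the .getD defaults are never used)
def entOf (l : String) : String :=
  (PySem.List.pyGet? ((PySem.Str.splitMax? l "-" 1).getD []) 1).getD ""

-- ===== PORT A =====
-- loop body of A's pairing pass over list(seen)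
def addPartner (seen : PySem.Set String) (additions : PySem.Set String) (l : String) : PySem.Set String :=
  let additions :=
    if PySem.Str.startswith l "B-" then
      if PySem.Set.contains seen ("I-" ++ entOf l) = false then additions.add ("I-" ++ entOf l)
      else additions
    else additions
  if PySem.Str.startswith l "I-" then
    if PySem.Set.contains seen ("B-" ++ entOf l) = false then additions.add ("B-" ++ entOf l)
    else additions
  else additions

def build_label_list (label_seqs : List (List String)) : List String :=
  let seen : PySem.Set String :=
    label_seqs.foldl (fun seen seq => seq.foldl (fun seen l => seen.add l) seen) PySem.Set.empty
  let additions : PySem.Set String := seen.foldl (addPartner seen) PySem.Set.empty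
  let seen := seen.update additions
  "O" :: PySem.List.sorted (seen.filter (fun x => x != "O")) (fun x => x) false

-- ===== PORT B =====
-- loop body of B's classification pass (entities, others)
def classify (eo : PySem.Set String × PySem.Set String) (l : String) :
    PySem.Set String × PySem.Set String :=
  if l == "O" then eo
  else if PySem.Str.startswith l "B-" || PySem.Str.startswith l "I-" then
    (eo.1.add (entOf l), eo.2)
  else (eo.1, eo.2.add l)

def build_label_list_alt (label_seqs : List (List String)) : List String :=
  let eo := label_seqs.foldl (fun eo seq => seq.foldl classify eo) (PySem.Set.empty, PySem.Set.empty)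
  let result := PySem.Set.union eo.2 (eo.1.flatMap (fun e => ["B-" ++ e, "I-" ++ e]))
  "O" :: PySem.List.sorted result (fun x => x) false

-- ===== PRECONDITION & SPEC =====
def Spec_build_label_list (label_seqs : List (List String)) (out : List String) : Prop := out = build_label_list_alt label_seqs
instance (label_seqs : List (List String)) (out : List String) : Decidable (Spec_build_label_list label_seqs out) := by unfold Spec_build_label_list; infer_instance

-- ===== CLAIM (what is proved, stated in full; the proofs are below) =====
def Claim_equal_build_label_list : Prop := ∀ (label_seqs : List (List String)), Dom_build_label_list label_seqs → Spec_build_label_list label_seqs (build_label_list label_seqs)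

-- ===== LEMMAS AND PROOFS =====

-- one step of Python's  s.split("-", 1)  on a string starting "c-" with c ≠ '-'
theorem split_step (c : Char) (hc : ¬ c = '-') (rest : List Char) :
    PySem.Chars.splitOnMax (c :: '-' :: rest) ['-'] 1 = [[c], rest] := by
  have hc' : ¬ ('-' = c) := fun h => hc h.symm
  simp [PySem.Chars.splitOnMax, PySem.Chars.splitOnMax.go, List.isPrefixOf, hc']
  cases rest with
  | nil => simp [PySem.Chars.splitOnMax.go]
  | cons a t => simp [PySem.Chars.splitOnMax.go]

theorem entOf_of_toList (c : Char) (hc : ¬ c = '-') (rest : List Char) (l : String)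
    (hl : l.toList = c :: '-' :: rest) : entOf l = String.ofList rest := by
  have h1 : PySem.Chars.splitMax? l.toList ['-'] 1 = some [[c], rest] := by
    rw [hl]; simp [PySem.Chars.splitMax?, split_step c hc rest]
  unfold entOf
  have h2 : PySem.Str.splitMax? l "-" 1 = some [String.ofList [c], String.ofList rest] := by
    simp only [PySem.Str.splitMax?, Option.map_eq_some_iff,
      show ("-" : String).toList = ['-'] from rfl]
    exact ⟨[[c], rest], h1, rfl⟩
  rw [h2]
  simp [PySem.List.pyGet?, PySem.List.pyIdx?]

theorem startswith_toList (c : Char) (p l : String) (hp : p.toList = [c, '-']) :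
    PySem.Str.startswith l p = true ↔ ∃ rest, l.toList = c :: '-' :: rest := by
  have he : PySem.Str.startswith l p = List.isPrefixOf [c, '-'] l.toList := by
    simp [PySem.Str.startswith, PySem.Chars.startswith, hp]
  rw [he, List.isPrefixOf_iff_prefix]
  constructor
  · rintro ⟨t, ht⟩; exact ⟨t, ht.symm⟩
  · rintro ⟨rest, hr⟩; exact ⟨rest, by rw [hr]; rfl⟩

theorem recon (c : Char) (hc : ¬ c = '-') (p l : String) (hp : p.toList = [c, '-'])
    (h : PySem.Str.startswith l p = true) : l = p ++ entOf l := by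
  obtain ⟨rest, hr⟩ := (startswith_toList c p l hp).mp h
  rw [entOf_of_toList c hc rest l hr]
  rw [← String.toList_inj]
  simp [hr, hp]

theorem app_ne_O (c : Char) (p e : String) (hp : p.toList = [c, '-']) : ¬ (p ++ e = "O") := by
  intro h
  have := congrArg String.toList h
  simp [hp] at this

theorem hB : ("B-" : String).toList = ['B', '-'] := rfl
theorem hI : ("I-" : String).toList = ['I', '-'] := rfl
theorem hcB : ¬ ('B' = '-') := by decide
theorem hcI : ¬ ('I' = '-') := by decide

-- membership predicate generated by one element of A's pairing loop
def PA (seen : PySem.Set String) (l x : String) : Prop :=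
  (PySem.Str.startswith l "B-" = true ∧ ("I-" ++ entOf l) ∉ seen ∧ x = "I-" ++ entOf l) ∨
  (PySem.Str.startswith l "I-" = true ∧ ("B-" ++ entOf l) ∉ seen ∧ x = "B-" ++ entOf l)

theorem contains_false (s : PySem.Set String) (x : String) :
    PySem.Set.contains s x = false ↔ x ∉ s := by
  rw [← PySem.Set.contains_iff]
  cases PySem.Set.contains s x <;> simp

theorem mem_addPartner (seen acc : PySem.Set String) (l x : String) :
    x ∈ addPartner seen acc l ↔ x ∈ acc ∨ PA seen l x := by
  unfold addPartner PA
  split_ifs with h1 h2 h3 h4 <;>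
    simp only [PySem.Set.mem_add, contains_false, not_not] at * <;> tauto

theorem mem_addfold (seen : PySem.Set String) (ls : List String) (acc : PySem.Set String)
    (x : String) :
    x ∈ ls.foldl (addPartner seen) acc ↔ x ∈ acc ∨ ∃ l ∈ ls, PA seen l x := by
  induction ls generalizing acc with
  | nil => simp
  | cons a t ih => rw [List.foldl_cons, ih]; simp [mem_addPartner]; tauto

theorem mem_classify1 (acc : PySem.Set String × PySem.Set String) (a x : String) :
    x ∈ (classify acc a).1 ↔ x ∈ acc.1 ∨ (¬ a = "O" ∧
      (PySem.Str.startswith a "B-" = true ∨ PySem.Str.startswith a "I-" = true) ∧ x = entOf a) := by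
  unfold classify
  split_ifs with h1 h2 <;>
    simp only [PySem.Set.mem_add, beq_iff_eq, Bool.or_eq_true] at * <;> tauto

theorem mem_classify2 (acc : PySem.Set String × PySem.Set String) (a x : String) :
    x ∈ (classify acc a).2 ↔ x ∈ acc.2 ∨ (¬ a = "O" ∧
      ¬ (PySem.Str.startswith a "B-" = true ∨ PySem.Str.startswith a "I-" = true) ∧ x = a) := by
  unfold classify
  split_ifs with h1 h2 <;>
    simp only [PySem.Set.mem_add, beq_iff_eq, Bool.or_eq_true] at * <;> tauto

theorem mem_classifyfold (ls : List String) (acc : PySem.Set String × PySem.Set String)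
    (x : String) :
    (x ∈ (ls.foldl classify acc).1 ↔ x ∈ acc.1 ∨ ∃ l ∈ ls, ¬ l = "O" ∧
        (PySem.Str.startswith l "B-" = true ∨ PySem.Str.startswith l "I-" = true) ∧ x = entOf l) ∧
    (x ∈ (ls.foldl classify acc).2 ↔ x ∈ acc.2 ∨ ∃ l ∈ ls, ¬ l = "O" ∧
        ¬ (PySem.Str.startswith l "B-" = true ∨ PySem.Str.startswith l "I-" = true) ∧ x = l) := by
  induction ls generalizing acc with
  | nil => simp
  | cons a t ih =>
    rw [List.foldl_cons]
    constructor
    · rw [(ih (classify acc a)).1, mem_classify1]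
      simp only [List.mem_cons, exists_eq_or_imp]
      exact or_assoc
    · rw [(ih (classify acc a)).2, mem_classify2]
      simp only [List.mem_cons, exists_eq_or_imp]
      exact or_assoc

theorem nodup_classifyfold (ls : List String) (acc : PySem.Set String × PySem.Set String)
    (h1 : acc.1.Nodup) (h2 : acc.2.Nodup) :
    (ls.foldl classify acc).1.Nodup ∧ (ls.foldl classify acc).2.Nodup := by
  induction ls generalizing acc with
  | nil => exact ⟨h1, h2⟩
  | cons a t ih =>
    rw [List.foldl_cons]
    apply ih
    · unfold classify; split_ifs <;> simp [PySem.Set.nodup_add, h1, h2]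
    · unfold classify; split_ifs <;> simp [PySem.Set.nodup_add, h1, h2]

theorem build_label_list_spec : Claim_equal_build_label_list := by
  intro ls _
  unfold Spec_build_label_list build_label_list build_label_list_alt
  have hseen : (ls.foldl (fun seen seq => seq.foldl (fun seen l => PySem.Set.add seen l) seen)
      PySem.Set.empty) = PySem.Set.ofList ls.flatten := by
    rw [PySem.Set.ofList_eq_foldl, List.foldl_flatten]
    rfl
  have heo : (ls.foldl (fun eo seq => seq.foldl classify eo)
      ((PySem.Set.empty : PySem.Set String), (PySem.Set.empty : PySem.Set String)))
      = ls.flatten.foldl classify (PySem.Set.empty, PySem.Set.empty) := by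
    rw [List.foldl_flatten]
  simp only [hseen, heo]
  set flat := ls.flatten with hflat
  set seen := PySem.Set.ofList flat with hs
  set eo := flat.foldl classify ((PySem.Set.empty : PySem.Set String), PySem.Set.empty) with heo2
  congr 1
  rw [PySem.List.sorted_id_eq_sorted_id_iff_perm]
  rw [List.perm_ext_iff_of_nodup]
  · intro x
    rw [List.mem_filter, PySem.Set.mem_update, mem_addfold, PySem.Set.mem_union,
        List.mem_flatMap]
    have hmemA : ∀ y, y ∈ seen ↔ y ∈ flat := fun y => PySem.Set.mem_ofList flat y
    have hE := fun y => (mem_classifyfold flat (PySem.Set.empty, PySem.Set.empty) y).1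
    have hO := fun y => (mem_classifyfold flat (PySem.Set.empty, PySem.Set.empty) y).2
    rw [heo2]
    simp only [hE, hO]
    simp only [PySem.Set.empty, List.mem_cons, List.not_mem_nil, or_false, false_or, bne_iff_ne, ne_eq]
    constructor
    · rintro ⟨hin, hxO⟩
      rcases hin with hxseen | hpa
      · -- x was a token label itself
        by_cases hb : PySem.Str.startswith x "B-" = true
        · refine Or.inr ⟨entOf x, ⟨x, (hmemA x).mp hxseen, hxO, Or.inl hb, rfl⟩, ?_⟩
          exact Or.inl (recon 'B' hcB "B-" x hB hb)
        · by_cases hi : PySem.Str.startswith x "I-" = true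
          · refine Or.inr ⟨entOf x, ⟨x, (hmemA x).mp hxseen, hxO, Or.inr hi, rfl⟩, ?_⟩
            exact Or.inr (recon 'I' hcI "I-" x hI hi)
          · exact Or.inl ⟨x, (hmemA x).mp hxseen, hxO, fun hcon => hcon.elim hb hi, rfl⟩
      · -- x was added by the pairing pass
        obtain ⟨l, hlmem, hpa⟩ := hpa
        rcases hpa with ⟨hb, _, hx⟩ | ⟨hi, _, hx⟩
        · have hlO : ¬ l = "O" := by
            intro h; rw [h] at hb; exact absurd hb (by decide)
          exact Or.inr ⟨entOf l, ⟨l, (hmemA l).mp hlmem, hlO, Or.inl hb, rfl⟩, Or.inr hx⟩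
        · have hlO : ¬ l = "O" := by
            intro h; rw [h] at hi; exact absurd hi (by decide)
          exact Or.inr ⟨entOf l, ⟨l, (hmemA l).mp hlmem, hlO, Or.inr hi, rfl⟩, Or.inl hx⟩
    · rintro (⟨l, hlmem, hlO, hns, rfl⟩ | ⟨e, ⟨l, hlmem, hlO, hsw, rfl⟩, hx⟩)
      · exact ⟨Or.inl ((hmemA x).mpr hlmem), hlO⟩
      · -- x = "B-" ++ entOf l or "I-" ++ entOf l, l ∈ flat starting with B- or I-
        rcases hsw with hb | hi
        · have hl : l = "B-" ++ entOf l := recon 'B' hcB "B-" l hB hb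
          rcases hx with rfl | rfl
          · exact ⟨Or.inl ((hmemA ("B-" ++ entOf l)).mpr (hl ▸ hlmem)), fun h => app_ne_O 'B' _ _ hB h⟩
          · by_cases hmem : ("I-" ++ entOf l) ∈ seen
            · exact ⟨Or.inl hmem, fun h => app_ne_O 'I' _ _ hI h⟩
            · exact ⟨Or.inr ⟨l, (hmemA l).mpr hlmem, Or.inl ⟨hb, hmem, rfl⟩⟩,
                fun h => app_ne_O 'I' _ _ hI h⟩
        · have hl : l = "I-" ++ entOf l := recon 'I' hcI "I-" l hI hi
          rcases hx with rfl | rfl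
          · by_cases hmem : ("B-" ++ entOf l) ∈ seen
            · exact ⟨Or.inl hmem, fun h => app_ne_O 'B' _ _ hB h⟩
            · exact ⟨Or.inr ⟨l, (hmemA l).mpr hlmem, Or.inr ⟨hi, hmem, rfl⟩⟩,
                fun h => app_ne_O 'B' _ _ hB h⟩
          · exact ⟨Or.inl ((hmemA ("I-" ++ entOf l)).mpr (hl ▸ hlmem)), fun h => app_ne_O 'I' _ _ hI h⟩
  · exact List.Nodup.filter _
      (PySem.Set.nodup_update _ _ (PySem.Set.nodup_ofList _))
  · exact PySem.Set.nodup_union _ _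
      (nodup_classifyfold flat _ List.nodup_nil List.nodup_nil).2
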